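-- pv_equiv track=rewrite | github.com/vincentsiddons/LogisticRegressionIRIS | LogisticRegressionModel.py | delete_starting_numbers
-- ===== SOURCE A (Python) =====
-- def delete_starting_numbers(arr):
--     indicies = []
--     i = 0
--     while i < len(arr):
--         if arr[i][0:1].isnumeric() == True:
--             indicies.append(i)
--         elif arr[i][0:1].isnumeric() == False:
--             break
--         i += 1
--     try:
--         arr = arr[indicies[len(indicies) - 1] + 2:len(arr)]
--     except:
--         return arr
--     return arr
-- ===== SOURCE B (Python) =====
-- def delete_starting_numbers(arr):
--     # Structural recursion instead of index bookkeeping: if the list does not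
--     # start with a numeric-prefixed element it is returned unchanged; otherwise
--     # _after_run consumes the rest of the numeric run and drops one separator.
--     if not arr or not arr[0][:1].isnumeric():
--         return arr
--     return _after_run(arr[1:])
--
-- def _after_run(rest):
--     # rest follows at least one numeric-prefixed element
--     if rest and rest[0][:1].isnumeric():
--         return _after_run(rest[1:])
--     return rest[1:]
-- ===== Notes on version B (the rewrite author's own statement) =====
-- stated objective: alternative
-- what changed: Replaces the index-list accumulation, break and try/except last-index slicing with a structural recursion that consumes the list element by element and drops the separator as the base case, with no indices or slicing by a computed position.
import Mathlib
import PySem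

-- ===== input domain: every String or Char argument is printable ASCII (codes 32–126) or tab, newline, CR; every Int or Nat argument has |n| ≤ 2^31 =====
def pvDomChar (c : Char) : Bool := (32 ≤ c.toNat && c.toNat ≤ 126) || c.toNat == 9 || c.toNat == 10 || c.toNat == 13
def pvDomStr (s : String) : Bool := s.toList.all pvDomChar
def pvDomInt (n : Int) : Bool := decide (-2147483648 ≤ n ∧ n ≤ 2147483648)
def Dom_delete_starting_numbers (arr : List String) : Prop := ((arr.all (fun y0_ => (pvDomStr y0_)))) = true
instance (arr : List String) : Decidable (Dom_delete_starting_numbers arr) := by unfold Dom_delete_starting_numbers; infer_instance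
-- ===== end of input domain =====

-- B replaces A's index-list + break + try/except slicing by a structural recursion that consumes the run and drops the separator in its base case (alternative decomposition).


-- shared helper: s[0:1].isnumeric() — exact on the ASCII domain, where isnumeric coincides with isdigit
def pvFirstNum (s : String) : Bool := PySem.Str.strIsdigit (PySem.Str.slice s (some 0) (some 1))

-- ===== PORT A =====
-- the while loop collecting indices of the leading numeric-prefixed run (break on first failure)
def pvGoA : List String → Int → List Int → List Int
  | [], _, acc => acc
  | s :: rest, i, acc => if pvFirstNum s then pvGoA rest (i + 1) (acc ++ [i]) else acc

def delete_starting_numbers (arr : List String) : List String :=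
  let indicies := pvGoA arr 0 []
  -- try: arr = arr[indicies[len(indicies)-1] + 2 : len(arr)]  except: return arr
  match PySem.List.pyGet? indicies ((indicies.length : Int) - 1) with
  | none => arr
  | some last => PySem.List.slice arr (some (last + 2)) (some (arr.length : Int))

-- ===== PORT B =====
-- _after_run: rest follows at least one numeric-prefixed element
def pvAfterRun : List String → List String
  | [] => []                                   -- rest[1:] of [] is []
  | s :: rest => if pvFirstNum s then pvAfterRun rest else rest

def delete_starting_numbers_alt (arr : List String) : List String :=
  match arr with
  | [] => []                                   -- 'not arr' → return arr
  | s :: rest => if pvFirstNum s then pvAfterRun rest else s :: rest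

-- ===== PRECONDITION & SPEC =====
def Spec_delete_starting_numbers (arr : List String) (out : List String) : Prop := out = delete_starting_numbers_alt arr
instance (arr : List String) (out : List String) : Decidable (Spec_delete_starting_numbers arr out) := by unfold Spec_delete_starting_numbers; infer_instance

-- ===== CLAIM =====
def Claim_equal_delete_starting_numbers : Prop := ∀ (arr : List String), Dom_delete_starting_numbers arr → Spec_delete_starting_numbers arr (delete_starting_numbers arr)

-- ===== LEMMAS AND PROOFS =====

-- proof-side helper: the list [i, i+1, …, i+n-1]
def pvIdxList (i : Int) : Nat → List Int
  | 0 => []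
  | n + 1 => i :: pvIdxList (i + 1) n

lemma pvIdxList_length (n : Nat) : ∀ (i : Int), (pvIdxList i n).length = n := by
  induction n with
  | zero => intro i; simp [pvIdxList]
  | succ n ih => intro i; simp [pvIdxList, ih]

lemma pvIdxList_getElem? (n : Nat) : ∀ (i : Int) (j : Nat), j < n → (pvIdxList i n)[j]? = some (i + j) := by
  induction n with
  | zero => omega
  | succ n ih =>
    intro i j hj
    cases j with
    | zero => simp [pvIdxList]
    | succ j =>
      have := ih (i + 1) j (by omega)
      simp [pvIdxList, this]
      ring

-- A's loop produces exactly the indices i, i+1, …, i+m-1, where m is the numeric-prefix length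
lemma pvGoA_eq (l : List String) : ∀ (i : Int) (acc : List Int),
    pvGoA l i acc = acc ++ pvIdxList i (l.takeWhile pvFirstNum).length := by
  induction l with
  | nil => intro i acc; simp [pvGoA, pvIdxList]
  | cons s rest ih =>
    intro i acc
    by_cases h : pvFirstNum s
    · simp [pvGoA, h, ih, pvIdxList]
    · simp [pvGoA, h, pvIdxList]

-- B's recursion drops the numeric run and one separator
lemma pvAfterRun_eq (l : List String) :
    pvAfterRun l = l.drop ((l.takeWhile pvFirstNum).length + 1) := by
  induction l with
  | nil => simp [pvAfterRun]
  | cons s rest ih =>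
    by_cases h : pvFirstNum s
    · simp [pvAfterRun, h, ih]
    · simp [pvAfterRun, h]

-- A's value in the same drop form
lemma portA_eq (arr : List String) :
    delete_starting_numbers arr =
      if (arr.takeWhile pvFirstNum).length = 0 then arr
      else arr.drop ((arr.takeWhile pvFirstNum).length + 1) := by
  unfold delete_starting_numbers
  rw [pvGoA_eq]
  set m := (arr.takeWhile pvFirstNum).length with hmdef
  rcases Nat.eq_zero_or_pos m with h0 | hpos
  · simp [h0, pvIdxList, PySem.List.pyGet?, PySem.List.pyIdx?]
  · have hget : PySem.List.pyGet? (pvIdxList 0 m) (((pvIdxList 0 m).length : Int) - 1)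
        = some ((m : Int) - 1) := by
      have h1 : ((m : Int) - 1) = ((m - 1 : Nat) : Int) := by omega
      rw [pvIdxList_length, h1, PySem.List.pyGet?_natCast,
        pvIdxList_getElem? m 0 (m - 1) (by omega)]
      congr 1
      omega
    simp only [List.nil_append, hget]
    have hne : m ≠ 0 := by omega
    have hcast : (m : Int) - 1 + 2 = ((m + 1 : Nat) : Int) := by push_cast; ring
    rw [hcast, if_neg hne, ← PySem.List.slice_from_natCast]
    have : PySem.List.slice arr (some ((m + 1 : Nat) : Int)) (some (arr.length : Int))
        = (arr.drop (m + 1)).take (arr.length - (m + 1)) := PySem.List.slice_natCast arr _ _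
    rw [this, PySem.List.slice_from_natCast]
    apply List.take_of_length_le
    simp

-- ===== VERDICT =====
theorem delete_starting_numbers_spec : Claim_equal_delete_starting_numbers := by
  intro arr _
  unfold Spec_delete_starting_numbers
  rw [portA_eq]
  cases arr with
  | nil => simp [delete_starting_numbers_alt]
  | cons s rest =>
    by_cases h : pvFirstNum s
    · simp [delete_starting_numbers_alt, h, pvAfterRun_eq]
    · simp [delete_starting_numbers_alt, h]
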